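-- pv_equiv track=rewrite | github.com/ljumbam/Score | score/scale.py | are_scale_intervals
-- ===== SOURCE A (Python) =====
-- def are_scale_intervals(intervals):
--     reason = ''
--     if not isinstance(intervals, list):
--         reason = ('{} is not a valid scale '
--                   'interval. It is not a '
--                   'list').format(str(intervals))
--         return False, reason
--     for i in intervals:
--         if not isinstance(i, int):
--             reason = ('{} is not a valid scale '
--                       'interval. Not all its items are '
--                       'integers').format(str(intervals))
--             return False, reason
--     if (max(intervals) - min(intervals)) > 11:
--         reason = ('{} is not a valid scale '
--                   'interval. Not all its notes '
--                   'fall within one '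
--                   'octave').format(str(intervals))
--         return False, reason
--     if not sorted(intervals) == intervals:
--         reason = ('{} is not a valid scale '
--                   'interval. The items are not '
--                   'in ascending order').format(str(intervals))
--         return False, reason
--     if not intervals[0] == 0:
--         reason = ('The first note of the interval {} is not '
--                   '0. It should be a 0').format(str(intervals))
--         return False, reason
--     return True, reason
-- ===== SOURCE B (Python) =====
-- def are_scale_intervals(intervals):
--     if not isinstance(intervals, list):
--         return False, ('{} is not a valid scale '
--                        'interval. It is not a '
--                        'list').format(str(intervals))
--     if not all(isinstance(i, int) for i in intervals):
--         return False, ('{} is not a valid scale '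
--                        'interval. Not all its items are '
--                        'integers').format(str(intervals))
--     head, *tail = intervals  # ValueError on empty list (A raises ValueError there too)
--     mn = mx = prev = head
--     asc = True
--     for x in tail:
--         if x < mn:
--             mn = x
--         if x > mx:
--             mx = x
--         if x < prev:
--             asc = False
--         prev = x
--     if mx - mn > 11:
--         return False, ('{} is not a valid scale '
--                        'interval. Not all its notes '
--                        'fall within one '
--                        'octave').format(str(intervals))
--     if not asc:
--         return False, ('{} is not a valid scale '
--                        'interval. The items are not '
--                        'in ascending order').format(str(intervals))
--     if not head == 0:
--         return False, ('The first note of the interval {} is not '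
--                        '0. It should be a 0').format(str(intervals))
--     return True, ''
-- ===== Notes on version B (the rewrite author's own statement) =====
-- stated objective: simpler
-- what changed: Replaces the max()/min() built-ins and the sorted(intervals)==intervals sort-and-compare with one linear pass that tracks min, max and an ascending flag, then performs the same checks in the same order with identical reason strings.
import Mathlib
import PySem

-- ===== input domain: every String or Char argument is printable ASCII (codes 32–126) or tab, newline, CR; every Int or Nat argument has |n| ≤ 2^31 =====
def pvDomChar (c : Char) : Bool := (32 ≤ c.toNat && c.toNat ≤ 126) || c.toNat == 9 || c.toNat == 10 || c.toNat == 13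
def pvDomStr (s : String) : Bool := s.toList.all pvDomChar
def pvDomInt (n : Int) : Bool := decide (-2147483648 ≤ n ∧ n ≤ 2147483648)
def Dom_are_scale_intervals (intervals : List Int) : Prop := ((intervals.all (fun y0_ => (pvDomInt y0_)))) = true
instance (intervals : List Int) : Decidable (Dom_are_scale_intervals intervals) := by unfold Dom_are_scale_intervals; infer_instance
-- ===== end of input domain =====

-- B replaces max()/min() and the sorted-and-compare test by one linear scan tracking min, max and an ascending flag (simpler, one pass); reason strings and check order are unchanged.

-- str(intervals): Python's repr of a list of ints, e.g. "[0, 2, 4]" (shared by both ports, as both Pythons format identically)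
def pyReprIntList (xs : List Int) : String :=
  "[" ++ PySem.Str.join ", " (xs.map PySem.Int.toStr) ++ "]"

-- ===== PORT A =====
-- isinstance(intervals, list) and the per-item isinstance(i, int) loop are always true on List Int
def are_scale_intervals (intervals : List Int) : Bool × String :=
  match PySem.List.max? intervals (fun y => y), PySem.List.min? intervals (fun y => y) with
  | some mx, some mn =>
    if mx - mn > 11 then
      (false, pyReprIntList intervals ++ " is not a valid scale interval. Not all its notes fall within one octave")
    else if ¬ (PySem.List.sorted intervals (fun y => y) false = intervals) then
      (false, pyReprIntList intervals ++ " is not a valid scale interval. The items are not in ascending order")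
    else
      match PySem.List.pyGet? intervals 0 with
      | some first =>
        if ¬ (first = 0) then
          (false, "The first note of the interval " ++ pyReprIntList intervals ++ " is not 0. It should be a 0")
        else (true, "")
      | none => (false, "")   -- unreachable: intervals nonempty here
  | _, _ => (false, "")       -- empty list: Python raises ValueError (excluded by Pre_)

-- ===== PORT B =====
def are_scale_intervals_alt (intervals : List Int) : Bool × String :=
  match intervals with
  | [] => (false, "")         -- Python B raises ValueError here (excluded by Pre_)
  | head :: tail =>
    let st := tail.foldl
      (fun (st : Int × Int × Bool × Int) x =>
        (if x < st.1 then x else st.1,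
         if x > st.2.1 then x else st.2.1,
         if x < st.2.2.2 then false else st.2.2.1,
         x))
      (head, head, true, head)
    if st.2.1 - st.1 > 11 then
      (false, pyReprIntList intervals ++ " is not a valid scale interval. Not all its notes fall within one octave")
    else if ¬ st.2.2.1 then
      (false, pyReprIntList intervals ++ " is not a valid scale interval. The items are not in ascending order")
    else if ¬ (head = 0) then
      (false, "The first note of the interval " ++ pyReprIntList intervals ++ " is not 0. It should be a 0")
    else (true, "")

-- ===== PRECONDITION & SPEC =====
-- Pre_ excludes only the empty list, on which Python A raises ValueError (max() of an empty sequence); B also raises there.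
def Pre_are_scale_intervals (intervals : List Int) : Prop := intervals ≠ []
instance (intervals : List Int) : Decidable (Pre_are_scale_intervals intervals) := by unfold Pre_are_scale_intervals; infer_instance
def pvWitness_are_scale_intervals : List Int := ([0, 2, 4] : List Int)

def Spec_are_scale_intervals (intervals : List Int) (out : Bool × String) : Prop := out = are_scale_intervals_alt intervals
instance (intervals : List Int) (out : Bool × String) : Decidable (Spec_are_scale_intervals intervals out) := by unfold Spec_are_scale_intervals; infer_instance

-- ===== CLAIM (what is proved, stated in full; the proofs are below) =====
def Claim_equal_are_scale_intervals : Prop := ∀ (intervals : List Int), Dom_are_scale_intervals intervals → Pre_are_scale_intervals intervals → Spec_are_scale_intervals intervals (are_scale_intervals intervals)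

-- ===== LEMMAS AND PROOFS =====

-- B's fold computes running min, running max, the ascending flag, and the last element
theorem foldB_spec (t : List Int) : ∀ (mn mx : Int) (asc : Bool) (prev : Int),
    List.foldl
      (fun (st : Int × Int × Bool × Int) x =>
        (if x < st.1 then x else st.1,
         if x > st.2.1 then x else st.2.1,
         if x < st.2.2.2 then false else st.2.2.1,
         x)) (mn, mx, asc, prev) t
    = (t.foldl min mn, t.foldl max mx,
       asc && decide (List.IsChain (fun a b => a ≤ b) (prev :: t)), t.getLastD prev) := by
  induction t with
  | nil => intro mn mx asc prev; simp
  | cons x xs ih =>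
    intro mn mx asc prev
    simp only [List.foldl_cons, ih, List.getLastD_cons, List.isChain_cons_cons, Bool.decide_and]
    have h1 : (if x < mn then x else mn) = min mn x := by
      rw [min_def]; split_ifs <;> omega
    have h2 : (if x > mx then x else mx) = max mx x := by
      rw [max_def]; split_ifs <;> omega
    have h3 : (if x < prev then false else asc) = (asc && decide (prev ≤ x)) := by
      by_cases hx : x < prev
      · have hpx : ¬ prev ≤ x := by omega
        simp [hx, hpx]
      · have hpx : prev ≤ x := by omega
        simp [hx, hpx]
    rw [h1, h2, h3, Bool.and_assoc]

-- sorted(xs) == xs (no key) is exactly "pairwise ≤"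
theorem sorted_eq_self_iff (xs : List Int) :
    PySem.List.sorted xs (fun y => y) false = xs ↔ xs.Pairwise (fun a b => a ≤ b) := by
  constructor
  · intro h
    have := PySem.List.sorted_pairwise xs (fun y => y)
    rw [h] at this; exact this
  · exact PySem.List.sorted_eq_self_of_pairwise xs (fun y => y)

-- ===== VERDICT (by name: the statement is the Claim_ definition above) =====
theorem are_scale_intervals_spec : Claim_equal_are_scale_intervals := by
  intro intervals _ hpre
  unfold Spec_are_scale_intervals
  match intervals, hpre with
  | h :: t, _ =>
    show are_scale_intervals (h :: t) = are_scale_intervals_alt (h :: t)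
    unfold are_scale_intervals are_scale_intervals_alt
    simp only [PySem.List.max?_id_cons, PySem.List.min?_id_cons, foldB_spec]
    have key : List.IsChain (fun a b : Int => a ≤ b) (h :: t)
        ↔ PySem.List.sorted (h :: t) (fun y => y) false = h :: t := by
      rw [sorted_eq_self_iff, ← List.isChain_iff_pairwise]
    by_cases h1 : t.foldl max h - t.foldl min h > 11
    · simp [h1]
    · by_cases hc : List.IsChain (fun a b : Int => a ≤ b) (h :: t)
      · have h2 := key.mp hc
        by_cases h3 : h = 0
        · subst h3; simp [h1, h2, hc]
        · simp [h1, h2, hc, h3]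
      · have h2 : ¬ PySem.List.sorted (h :: t) (fun y => y) false = h :: t :=
          fun hs => hc (key.mpr hs)
        simp [h1, h2, hc]
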